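-- pv_equiv track=rewrite | github.com/UWPCE-PythonCert-ClassRepos/SP_Online_PY210 | students/mattcasari/lesson04/trigrams.py | remove_capitalization
-- ===== SOURCE A (Python) =====
-- def remove_capitalization(in_data):
--     """
--     Removes capitalization from string except for "I".
--
--     Args:
--         in_data: string to convert to lower case.
--     Returns:
--         Formatted string
--
--     ToDo:
--         Add ability to keep proper nouns capitalized.
--     """
--     return_data = []
--     for data in in_data.split(" "):
--         data = data.lower()
--         if len(data) == 1:
--             if data == 'i':
--                 data = data.capitalize()
--         if len(data) > 1:
--             if data[0] == 'i' and data[1] == '\'':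
--                 data = data.capitalize()
--         return_data.extend("".join(data))
--         return_data += " "
--     return "".join(return_data[:-1])
-- ===== SOURCE B (Python) =====
-- def remove_capitalization(in_data):
--     """Lowercase the text, then fix 'I' in one character scan (no token splitting)."""
--     t = in_data.lower()
--     n = len(t)
--     out = []
--     at_start = True
--     for k in range(n):
--         c = t[k]
--         nxt = t[k + 1] if k + 1 < n else ""
--         if at_start and c == 'i' and nxt in ("", " ", "'"):
--             c = 'I'
--         out.append(c)
--         at_start = t[k] == ' '
--     return "".join(out)
-- ===== Notes on version B (the rewrite author's own statement) =====
-- stated objective: alternative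
-- what changed: A splits the text on spaces, fixes each token, and rejoins with spaces; B lowercases the whole string once and does a single character scan, uppercasing an 'i' exactly where the previous character is a space (or start) and the next is a space, apostrophe or end.
import Mathlib
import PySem

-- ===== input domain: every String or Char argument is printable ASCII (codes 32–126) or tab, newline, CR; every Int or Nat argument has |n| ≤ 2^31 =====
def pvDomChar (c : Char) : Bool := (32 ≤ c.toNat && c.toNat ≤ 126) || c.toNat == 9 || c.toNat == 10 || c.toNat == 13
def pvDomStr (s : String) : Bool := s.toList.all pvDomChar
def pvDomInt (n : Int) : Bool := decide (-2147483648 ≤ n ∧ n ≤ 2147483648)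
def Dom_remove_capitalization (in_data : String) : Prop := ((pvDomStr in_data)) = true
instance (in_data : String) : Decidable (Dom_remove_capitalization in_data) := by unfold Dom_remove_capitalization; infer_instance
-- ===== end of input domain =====

-- B replaces A's split-into-tokens / per-token fixup / rejoin loop by one lowercase pass and a
-- single character scan fixing the qualifying 'i's in place (objective: simpler, same cost).

-- ===== PORT A =====
-- port of Python's str.capitalize (exact on the ASCII strings this code feeds it)
def pyCapitalize (cs : List Char) : List Char :=
  match cs with
  | [] => []
  | c :: rest => PySem.Chars.upperChar c :: PySem.Chars.lower rest

-- the body of A's loop for one token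
def procTokenA (t : String) : List Char :=
  let data := (PySem.Str.lower t).toList
  let data := if data.length = 1 then (if data = ['i'] then pyCapitalize data else data) else data
  let data := if 1 < data.length then
      (if PySem.List.pyGet? data 0 = some 'i' ∧ PySem.List.pyGet? data 1 = some '\'' then
        pyCapitalize data else data)
    else data
  data

def remove_capitalization (in_data : String) : String :=
  let tokens := (PySem.Str.split? in_data " ").getD []
  let return_data := tokens.foldl (fun acc t => (acc ++ procTokenA t) ++ [' ']) []
  String.ofList (PySem.List.slice return_data none (some (-1)))

-- ===== PORT B =====
-- does the next character allow the fixup? (Python: nxt in ("", " ", "'"))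
def altNextOk (rest : List Char) : Bool :=
  match rest.head? with
  | none => true
  | some n => n == ' ' || n == '\''

-- B's scan: atStart tracks whether the previous character was a space (or start of string)
def altGo (atStart : Bool) (cs : List Char) : List Char :=
  match cs with
  | [] => []
  | c :: rest =>
    (if atStart && c == 'i' && altNextOk rest then 'I' else c) :: altGo (c == ' ') rest

def remove_capitalization_alt (in_data : String) : String :=
  String.ofList (altGo true (PySem.Str.lower in_data).toList)

-- ===== PRECONDITION & SPEC =====
def Spec_remove_capitalization (in_data : String) (out : String) : Prop := out = remove_capitalization_alt in_data
instance (in_data : String) (out : String) : Decidable (Spec_remove_capitalization in_data out) := by unfold Spec_remove_capitalization; infer_instance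

-- ===== CLAIM (what is proved, stated in full; the proofs are below) =====
def Claim_equal_remove_capitalization : Prop := ∀ (in_data : String), Dom_remove_capitalization in_data → Spec_remove_capitalization in_data (remove_capitalization in_data)

-- ===== LEMMAS AND PROOFS =====

-- A's loop body at the list-of-chars level, on an already-lowercased token
def procL (d0 : List Char) : List Char :=
  let d1 := if d0.length = 1 then (if d0 = ['i'] then pyCapitalize d0 else d0) else d0
  if 1 < d1.length then
    (if PySem.List.pyGet? d1 0 = some 'i' ∧ PySem.List.pyGet? d1 1 = some '\'' then
      pyCapitalize d1 else d1)
  else d1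

-- reference form of splitting on a single space
def splitList (pre : List Char) : List Char → List (List Char)
  | [] => [pre]
  | c :: rest => if c = ' ' then pre :: splitList [] rest else splitList (pre ++ [c]) rest

-- join with single spaces
def joinSp : List (List Char) → List Char
  | [] => []
  | [p] => p
  | p :: q :: r => p ++ ' ' :: joinSp (q :: r)

lemma procTokenA_eq (t : String) : procTokenA t = procL (PySem.Chars.lower t.toList) := by
  simp [procTokenA, procL, PySem.Str.toList_lower]

-- ---- characterising PySem's splitOn on sep = " " ----

lemma go_spec (fuel : Nat) : ∀ (l cur : List Char) (acc : List (List Char)), l.length ≤ fuel →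
    PySem.Chars.splitOn.go [' '] fuel l cur acc = acc.reverse ++ splitList cur.reverse l := by
  induction fuel with
  | zero =>
    intro l cur acc h
    have hl : l = [] := by cases l <;> simp_all
    subst hl
    simp [PySem.Chars.splitOn.go, splitList]
  | succ n ih =>
    intro l cur acc h
    cases l with
    | nil => simp [PySem.Chars.splitOn.go, splitList]
    | cons c rest =>
      by_cases hc : c = ' '
      · subst hc
        simp only [PySem.Chars.splitOn.go, splitList]
        rw [if_pos (by simp [List.isPrefixOf])]
        have hd : List.drop [' '].length (' ' :: rest) = rest := rfl
        rw [List.length_cons] at h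
        rw [hd, ih _ _ _ (by omega)]
        simp
      · simp only [PySem.Chars.splitOn.go, splitList]
        rw [if_neg (by simp [List.isPrefixOf]; exact Ne.symm hc)]
        rw [List.length_cons] at h
        rw [ih _ _ _ (by omega)]
        simp [hc]

lemma splitOn_eq (s : List Char) : PySem.Chars.splitOn s [' '] = splitList [] s := by
  have := go_spec (s.length + 1) s [] [] (by omega)
  simpa [PySem.Chars.splitOn] using this

lemma splitList_ne_nil : ∀ (l pre : List Char), splitList pre l ≠ [] := by
  intro l
  induction l with
  | nil => intro pre; simp [splitList]
  | cons c rest ih => intro pre; by_cases hc : c = ' ' <;> simp [splitList, hc, ih]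

lemma splitList_append (w : List Char) (hw : ' ' ∉ w) : ∀ (pre t : List Char),
    splitList pre (w ++ t) = splitList (pre ++ w) t := by
  induction w with
  | nil => intro pre t; simp
  | cons c cs ih =>
    intro pre t
    have hc : c ≠ ' ' := fun h => hw (h ▸ List.mem_cons_self ..)
    have hcs : ' ' ∉ cs := fun h => hw (List.mem_cons_of_mem _ h)
    simp only [List.cons_append, splitList]
    rw [if_neg hc, ih hcs]
    simp

-- ---- facts about PySem's lowerChar ----

lemma charOfNat_toNat (n : Nat) (h : n < 55296) : (Char.ofNat n).toNat = n := by
  rw [Char.ofNat, dif_pos (Or.inl h)]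
  simp [Char.ofNatAux, Char.toNat]

lemma isupper_iff (c : Char) : PySem.Chars.isupper c = true ↔ (65 ≤ c.toNat ∧ c.toNat ≤ 90) := by
  simp only [PySem.Chars.isupper, Bool.and_eq_true, decide_eq_true_eq, Char.le_def,
    UInt32.le_iff_toNat_le]
  exact Iff.rfl

lemma lowerChar_idem (c : Char) :
    PySem.Chars.lowerChar (PySem.Chars.lowerChar c) = PySem.Chars.lowerChar c := by
  by_cases h : PySem.Chars.isupper c = true
  · obtain ⟨h1, h2⟩ := (isupper_iff c).mp h
    have hd : (Char.ofNat (c.toNat + 32)).toNat = c.toNat + 32 := charOfNat_toNat _ (by omega)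
    have hnd : ¬ PySem.Chars.isupper (Char.ofNat (c.toNat + 32)) = true := by
      rw [isupper_iff, hd]; omega
    simp [PySem.Chars.lowerChar, h, hnd]
  · simp [PySem.Chars.lowerChar, h]

lemma lowerChar_space_iff (c : Char) : PySem.Chars.lowerChar c = ' ' ↔ c = ' ' := by
  constructor
  · intro h
    by_cases hu : PySem.Chars.isupper c = true
    · exfalso
      obtain ⟨h1, h2⟩ := (isupper_iff c).mp hu
      have hd : (Char.ofNat (c.toNat + 32)).toNat = c.toNat + 32 := charOfNat_toNat _ (by omega)
      rw [PySem.Chars.lowerChar, if_pos hu] at h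
      have h' := congrArg Char.toNat h
      rw [hd] at h'
      have h32 : (' ' : Char).toNat = 32 := by decide
      rw [h32] at h'
      omega
    · rwa [PySem.Chars.lowerChar, if_neg hu] at h
  · intro h; subst h; decide

lemma splitList_lower : ∀ (l pre : List Char),
    splitList (pre.map PySem.Chars.lowerChar) (l.map PySem.Chars.lowerChar)
      = (splitList pre l).map (List.map PySem.Chars.lowerChar) := by
  intro l
  induction l with
  | nil => intro pre; simp [splitList]
  | cons c rest ih =>
    intro pre
    by_cases hc : c = ' '
    · subst hc
      have : PySem.Chars.lowerChar ' ' = ' ' := by decide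
      simp [splitList, this, ← ih []]
    · have hl : PySem.Chars.lowerChar c ≠ ' ' := fun h => hc ((lowerChar_space_iff c).mp h)
      have := ih (pre ++ [c])
      simp only [List.map_cons, splitList, if_neg hc, if_neg hl]
      simpa using this

-- ---- the scan side ----

lemma altGo_false_append (cs : List Char) (hcs : ' ' ∉ cs) (t : List Char) :
    altGo false (cs ++ t) = cs ++ altGo false t := by
  induction cs with
  | nil => simp
  | cons c cs' ih =>
    have hc : c ≠ ' ' := fun h => hcs (h ▸ List.mem_cons_self ..)
    have hcs' : ' ' ∉ cs' := fun h => hcs (List.mem_cons_of_mem _ h)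
    simp only [List.cons_append, altGo]
    rw [show (c == ' ') = false by simp [hc], ih hcs']
    simp

lemma altGo_false_sep (rest : List Char) : altGo false (' ' :: rest) = ' ' :: altGo true rest := by
  simp [altGo, altNextOk]

-- one token of the scan equals A's per-token fixup, for a lowercased space-free token
lemma altGo_token (w t : List Char) (hw : ' ' ∉ w)
    (hl : ∀ c ∈ w, PySem.Chars.lowerChar c = c)
    (ht : t.head? = none ∨ t.head? = some ' ') :
    altGo true (w ++ t) = procL w ++ altGo false t := by
  have htok : altNextOk t = true := by
    rcases ht with h | h <;> simp [altNextOk, h]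
  match w with
  | [] =>
    simp only [List.nil_append]
    have hp : procL [] = [] := by decide
    rw [hp, List.nil_append]
    rcases ht with h | h
    · have : t = [] := by cases t <;> simp_all
      subst this; rfl
    · obtain ⟨r, rfl⟩ : ∃ r, t = ' ' :: r := by
        cases t with
        | nil => simp at h
        | cons a r => exact ⟨r, by simp_all⟩
      rw [altGo_false_sep]
      simp [altGo, altNextOk]
  | [c] =>
    have hw' : ¬ ' ' = c := by simpa using hw
    have hc : c ≠ ' ' := fun h => hw' h.symm
    by_cases hi : c = 'i'
    · subst hi
      have hp : procL ['i'] = ['I'] := by decide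
      simp [altGo, htok, hp]
    · have hp : procL [c] = [c] := by
        simp [procL, hi]
      simp only [List.cons_append, List.nil_append, altGo, hp]
      rw [show (c == ' ') = false by simp [hc]]
      simp [htok, hi]
  | c1 :: c2 :: cs =>
    have hw' : ¬ ' ' = c1 ∧ ¬ ' ' = c2 ∧ ' ' ∉ cs := by simpa using hw
    have hc1 : c1 ≠ ' ' := fun h => hw'.1 h.symm
    have hc2 : c2 ≠ ' ' := fun h => hw'.2.1 h.symm
    have hcs : ' ' ∉ c2 :: cs := by
      simp only [List.mem_cons, not_or]
      exact ⟨hw'.2.1, hw'.2.2⟩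
    have hlow : PySem.Chars.lower (c2 :: cs) = c2 :: cs := by
      show List.map PySem.Chars.lowerChar (c2 :: cs) = c2 :: cs
      have hid : ∀ a ∈ c2 :: cs, PySem.Chars.lowerChar a = id a :=
        fun a ha => hl a (List.mem_cons_of_mem _ ha)
      rw [List.map_congr_left hid, List.map_id]
    have hget0 : PySem.List.pyGet? (c1 :: c2 :: cs) (0 : Int) = some c1 := by
      have hpos : (0:Int) ≤ (cs.length:Int) + 1 := by positivity
      simp [PySem.List.pyGet?, PySem.List.pyIdx?, hpos]
    have hget1 : PySem.List.pyGet? (c1 :: c2 :: cs) (1 : Int) = some c2 := by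
      simp [PySem.List.pyGet?, PySem.List.pyIdx?]
    have hlen1 : (c1 :: c2 :: cs).length ≠ 1 := by simp
    have htail : altGo (c1 == ' ') ((c2 :: cs) ++ t) = (c2 :: cs) ++ altGo false t := by
      rw [show (c1 == ' ') = false by simp [hc1]]
      exact altGo_false_append _ hcs t
    by_cases hcond : c1 = 'i' ∧ c2 = '\''
    · obtain ⟨hi, hq⟩ := hcond
      have hp : procL (c1 :: c2 :: cs) = 'I' :: c2 :: cs := by
        simp only [procL, hlen1, if_false, if_pos (by simp : (1:Nat) < (c1 :: c2 :: cs).length),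
          hget0, hget1]
        rw [if_pos ⟨by rw [hi], by rw [hq]⟩]
        simp [pyCapitalize, hlow, hi]
        decide
      have hnext : altNextOk ((c2 :: cs) ++ t) = true := by
        simp [altNextOk, hq]
      show (if true && (c1 == 'i') && altNextOk ((c2 :: cs) ++ t) then 'I' else c1)
          :: altGo (c1 == ' ') ((c2 :: cs) ++ t) = procL (c1 :: c2 :: cs) ++ altGo false t
      rw [htail, hp, hnext]
      simp [hi]
    · have hp : procL (c1 :: c2 :: cs) = c1 :: c2 :: cs := by
        simp only [procL, hlen1, if_false, if_pos (by simp : (1:Nat) < (c1 :: c2 :: cs).length),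
          hget0, hget1]
        rw [if_neg (by simpa using hcond)]
      have hnext : ¬ (true && (c1 == 'i') && altNextOk ((c2 :: cs) ++ t)) = true := by
        simp [altNextOk, hc2]
        intro hi hq
        exact absurd ⟨hi, hq⟩ hcond
      show (if true && (c1 == 'i') && altNextOk ((c2 :: cs) ++ t) then 'I' else c1)
          :: altGo (c1 == ' ') ((c2 :: cs) ++ t) = procL (c1 :: c2 :: cs) ++ altGo false t
      rw [htail, hp, if_neg hnext]
      simp

lemma joinSp_cons (p : List Char) (l : List (List Char)) (h : l ≠ []) :
    joinSp (p :: l) = p ++ ' ' :: joinSp l := by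
  cases l with
  | nil => simp at h
  | cons q r => rfl

lemma first_space : ∀ (L : List Char), ' ' ∈ L → ∃ w rest, L = w ++ ' ' :: rest ∧ ' ' ∉ w := by
  intro L
  induction L with
  | nil => intro h; simp at h
  | cons c tl ih =>
    intro h
    by_cases hc : c = ' '
    · exact ⟨[], tl, by simp [hc], by simp⟩
    · have : ' ' ∈ tl := by
        rcases List.mem_cons.mp h with h1 | h1
        · exact absurd h1.symm hc
        · exact h1
      obtain ⟨w, rest, h1, h2⟩ := ih this
      exact ⟨c :: w, rest, by simp [h1], by simp [h2]; exact fun hh => hc hh.symm⟩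

lemma main_lemma : ∀ (n : Nat) (L : List Char), L.length ≤ n →
    (∀ c ∈ L, PySem.Chars.lowerChar c = c) →
    joinSp ((splitList [] L).map procL) = altGo true L := by
  intro n
  induction n with
  | zero =>
    intro L h _
    have : L = [] := by cases L <;> simp_all
    subst this
    decide
  | succ n ih =>
    intro L hlen hl
    by_cases hsp : ' ' ∈ L
    · obtain ⟨w, rest, rfl, hw⟩ := first_space L hsp
      have hsplit : splitList [] (w ++ ' ' :: rest) = w :: splitList [] rest := by
        rw [splitList_append w hw [] (' ' :: rest)]
        simp [splitList]
      have hlr : ∀ c ∈ rest, PySem.Chars.lowerChar c = c := fun c hc =>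
        hl c (by simp [hc])
      have hlw : ∀ c ∈ w, PySem.Chars.lowerChar c = c := fun c hc =>
        hl c (by simp [hc])
      have hrlen : rest.length ≤ n := by
        have := hlen
        simp [List.length_append] at this
        omega
      rw [hsplit, List.map_cons,
        joinSp_cons _ _ (by simp [splitList_ne_nil]),
        ih rest hrlen hlr,
        altGo_token w (' ' :: rest) hw hlw (Or.inr rfl),
        altGo_false_sep]
    · have hsplit : splitList [] L = [L] := by
        have := splitList_append L hsp [] []
        simpa [splitList] using this
      rw [hsplit]
      have := altGo_token L [] hsp hl (Or.inl rfl)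
      simp only [List.append_nil] at this
      rw [this]
      simp [joinSp, altGo]

lemma dropLast_flatMap (g : List Char → List Char) :
    ∀ (ts : List (List Char)), ts ≠ [] →
    (ts.flatMap (fun d => g d ++ [' '])).dropLast = joinSp (ts.map g) := by
  intro ts
  induction ts with
  | nil => simp
  | cons p r ih =>
    intro _
    cases r with
    | nil => simp [joinSp]
    | cons q r' =>
      have hne : (q :: r').flatMap (fun d => g d ++ [' ']) ≠ [] := by
        simp [List.flatMap_cons]
      rw [List.flatMap_cons, List.dropLast_append_of_ne_nil hne, ih (by simp)]
      simp [joinSp]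

-- ===== VERDICT (by name: the statement is the Claim_ definition above) =====
set_option maxHeartbeats 1600000 in
theorem remove_capitalization_spec : Claim_equal_remove_capitalization := by
  intro in_data _
  show remove_capitalization in_data = remove_capitalization_alt in_data
  simp only [remove_capitalization, remove_capitalization_alt]
  -- identify the tokens
  have hsm := PySem.Str.split?_map in_data " "
  have hsep : (" " : String).toList = [' '] := rfl
  rw [hsep, PySem.Chars.split?] at hsm
  rw [if_neg (by simp)] at hsm
  obtain ⟨ts, hts⟩ : ∃ ts, PySem.Str.split? in_data " " = some ts := by
    cases h : PySem.Str.split? in_data " " with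
    | none => rw [h] at hsm; simp at hsm
    | some ts => exact ⟨ts, rfl⟩
  rw [hts] at hsm
  simp only [Option.map_some, Option.some_inj] at hsm
  rw [hts]
  simp only [Option.getD_some]
  -- fold → flatMap
  have hfold : ts.foldl (fun acc t => (acc ++ procTokenA t) ++ [' ']) []
      = ts.flatMap (fun t => procTokenA t ++ [' ']) := by
    have hb : (fun (acc : List Char) t => (acc ++ procTokenA t) ++ [' '])
        = (fun acc t => acc ++ (procTokenA t ++ [' '])) := by
      funext acc t; simp
    rw [hb, PySem.List.foldl_append_eq_flatMap]
    simp
  rw [hfold, PySem.List.slice_to_neg_one]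
  -- tokens → char lists
  have htokeq : ts.map String.toList = splitList [] in_data.toList := by
    rw [← splitOn_eq]
    exact hsm
  have hcomm : splitList [] (PySem.Chars.lower in_data.toList)
      = (splitList [] in_data.toList).map (List.map PySem.Chars.lowerChar) := by
    simpa [PySem.Chars.lower] using splitList_lower in_data.toList []
  have hfun : (fun t => procTokenA t ++ [' '])
      = (fun t => procL (PySem.Chars.lower t.toList) ++ [' ']) := by
    funext t
    rw [procTokenA_eq]
  have hchain : ts.flatMap (fun t => procTokenA t ++ [' '])
      = (splitList [] (PySem.Chars.lower in_data.toList)).flatMap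
          (fun d => procL d ++ [' ']) := by
    calc ts.flatMap (fun t => procTokenA t ++ [' '])
        = (ts.map String.toList).flatMap
            (fun tc => procL (PySem.Chars.lower tc) ++ [' ']) := by
          rw [hfun, List.flatMap_map]
      _ = (splitList [] in_data.toList).flatMap
            (fun tc => procL (PySem.Chars.lower tc) ++ [' ']) := by rw [htokeq]
      _ = ((splitList [] in_data.toList).map (List.map PySem.Chars.lowerChar)).flatMap
            (fun d => procL d ++ [' ']) := by
          rw [List.flatMap_map]
          simp [PySem.Chars.lower]
      _ = (splitList [] (PySem.Chars.lower in_data.toList)).flatMap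
            (fun d => procL d ++ [' ']) := by rw [← hcomm]
  rw [hchain, dropLast_flatMap procL _ (splitList_ne_nil _ _)]
  have hfix : ∀ c ∈ PySem.Chars.lower in_data.toList, PySem.Chars.lowerChar c = c := by
    intro c hc
    rcases List.mem_map.mp hc with ⟨a, _, rfl⟩
    exact lowerChar_idem a
  rw [main_lemma (PySem.Chars.lower in_data.toList).length _ le_rfl hfix,
    PySem.Str.toList_lower]
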